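-- pv_equiv track=rewrite | github.com/Eli-Ferguson/GitHubCode | LeetCode/Easy/Question_1260/Question_1260.py | shiftGrid
-- ===== SOURCE A (Python) =====
-- def shiftGrid(grid: list[list[int]], k: int) -> list[list[int]]:
--
--     # Check for No shift
--     lg = len( grid[0] )
--     k = k % ( len( grid ) * lg )
--     if k == 0 : return grid
--
--     arr = []
--
--     # Flatten grid into a continuous arr
--     for row in grid :
--         for item in row :
--             arr.append( item )
--
--     # Splice arr and swap
--     arr = arr[-k:] + arr[:-k]
--
--     # Reformat array into grid shape
--     row = 0
--     for i in range( len( arr ) ) :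
--         spot = i % lg
--
--         grid[ row ][ spot ] = arr[ i ]
--
--         if i % lg == lg - 1 :
--             row += 1
--
--     return grid
-- ===== SOURCE B (Python) =====
-- def shiftGrid(grid: list[list[int]], k: int) -> list[list[int]]:
--     # Direct index mapping: target flat cell i*n+j is read from source (i*n+j-k) % total.
--     # Builds the whole new grid first, then writes it back in place (A also mutates grid).
--     m = len(grid)
--     n = len(grid[0])
--     total = m * n
--     k %= total
--     new = [[grid[((i * n + j - k) % total) // n][((i * n + j - k) % total) % n]
--             for j in range(n)]
--            for i in range(m)]
--     for r in range(m):
--         grid[r][:] = new[r]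
--     return grid
-- ===== Notes on version B (the rewrite author's own statement) =====
-- stated objective: alternative
-- what changed: B replaces A's flatten-into-a-buffer, slice-rotation and modular reshape-by-mutation loop with per-cell index arithmetic: each target cell (i,j) directly reads grid[src//n][src%n] with src=(i*n+j-k)%total, building the new grid in one comprehension before writing it back in place.
-- outside the precondition, e.g. on shiftGrid([[1, 2], [3]], 4): A returns [[1, 2], [3]], B raises IndexError; on shiftGrid([[1, 2], [3]], 1): A returns [[3, 1], [2]], B raises IndexError
import Mathlib
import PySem

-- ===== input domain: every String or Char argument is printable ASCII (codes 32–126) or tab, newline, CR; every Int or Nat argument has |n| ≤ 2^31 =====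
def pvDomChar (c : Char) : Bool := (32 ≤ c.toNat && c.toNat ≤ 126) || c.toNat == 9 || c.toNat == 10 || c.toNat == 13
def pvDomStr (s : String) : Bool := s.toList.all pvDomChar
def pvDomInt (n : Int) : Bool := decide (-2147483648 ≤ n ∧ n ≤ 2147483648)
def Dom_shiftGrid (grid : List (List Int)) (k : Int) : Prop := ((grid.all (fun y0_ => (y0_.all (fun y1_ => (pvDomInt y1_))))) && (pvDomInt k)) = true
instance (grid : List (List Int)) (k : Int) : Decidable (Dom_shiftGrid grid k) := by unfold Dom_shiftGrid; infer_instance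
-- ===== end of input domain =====

-- B replaces A's flatten/slice-rotate/reshape-by-mutation with direct per-cell index
-- arithmetic (src = (i*n+j-k) % total); same cost, a different decomposition.  Both A and B
-- mutate the argument grid in Python; the equivalence proved here is about the return value.

-- ===== PORT A =====
def shiftGrid (grid : List (List Int)) (k : Int) : List (List Int) :=
  let lg : Int := ((grid.headD []).length : Int)
  let k2 : Int := PySem.Int.mod k ((grid.length : Int) * lg)
  if k2 = 0 then grid
  else
    let arr : List Int := grid.foldl (fun acc row => row.foldl (fun a x => a ++ [x]) acc) []
    let arr2 : List Int :=
      PySem.List.slice arr (some (-k2)) none ++ PySem.List.slice arr none (some (-k2))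
    ((PySem.List.pyRange 0 (arr2.length : Int) 1).foldl
      (fun (st : List (List Int) × Int) i =>
        (PySem.List.pySetD st.1 st.2
          (PySem.List.pySetD (PySem.List.pyGetD st.1 st.2 []) (PySem.Int.mod i lg)
            (PySem.List.pyGetD arr2 i 0)),
         if PySem.Int.mod i lg = lg - 1 then st.2 + 1 else st.2))
      (grid, 0)).1

-- ===== PORT B =====
def shiftGrid_alt (grid : List (List Int)) (k : Int) : List (List Int) :=
  let m : Int := (grid.length : Int)
  let n : Int := ((grid.headD []).length : Int)
  let total : Int := m * n
  let k2 : Int := PySem.Int.mod k total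
  let new : List (List Int) :=
    (PySem.List.pyRange 0 m 1).map (fun i =>
      (PySem.List.pyRange 0 n 1).map (fun j =>
        PySem.List.pyGetD
          (PySem.List.pyGetD grid
            (PySem.Int.floordiv (PySem.Int.mod (i * n + j - k2) total) n) [])
          (PySem.Int.mod (PySem.Int.mod (i * n + j - k2) total) n) 0))
  (PySem.List.pyRange 0 m 1).foldl
    (fun g r => PySem.List.pySetD g r (PySem.List.pyGetD new r [])) grid

-- ===== PRECONDITION & SPEC =====
-- Pre_ excludes the empty grid and grids whose first row is empty (A raises IndexError resp.
-- ZeroDivisionError there) and ragged (non-rectangular) grids: on most of those A raises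
-- IndexError in its reshape loop, and on the rest the value A returns (the grid unchanged, or
-- a partial reshape driven by len(grid[0])) is an accident of its flatten-and-reshape
-- implementation, not a specified behaviour.
def Pre_shiftGrid (grid : List (List Int)) (k : Int) : Prop :=
  grid ≠ [] ∧ (grid.headD []).length ≠ 0 ∧ ∀ row ∈ grid, row.length = (grid.headD []).length
instance (grid : List (List Int)) (k : Int) : Decidable (Pre_shiftGrid grid k) := by
  unfold Pre_shiftGrid; infer_instance

def pvWitness_shiftGrid : List (List Int) × Int := ([[1, 2], [3, 4]], 3)

def Spec_shiftGrid (grid : List (List Int)) (k : Int) (out : List (List Int)) : Prop := out = shiftGrid_alt grid k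
instance (grid : List (List Int)) (k : Int) (out : List (List Int)) : Decidable (Spec_shiftGrid grid k out) := by unfold Spec_shiftGrid; infer_instance

-- ===== CLAIM (what is proved, stated in full; the proofs are below) =====
def Claim_equal_shiftGrid : Prop := ∀ (grid : List (List Int)) (k : Int), Dom_shiftGrid grid k → Pre_shiftGrid grid k → Spec_shiftGrid grid k (shiftGrid grid k)

-- ===== LEMMAS AND PROOFS =====

def rotFlat (grid : List (List Int)) (kN : Nat) : List Int :=
  grid.flatten.drop (grid.flatten.length - kN) ++ grid.flatten.take (grid.flatten.length - kN)

def GAux (grid : List (List Int)) (n : Nat) (arr2 : List Int) (t : Nat) : List (List Int) :=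
  (List.range grid.length).map (fun r =>
    (List.range n).map (fun c =>
      if r * n + c < t then arr2.getD (r * n + c) 0 else (grid.getD r []).getD c 0))

theorem idx_lt {i j m n : Nat} (hi : i < m) (hj : j < n) : i * n + j < m * n := by
  calc i * n + j < i * n + n := by omega
    _ = (i + 1) * n := by ring
    _ ≤ m * n := Nat.mul_le_mul_right n hi

theorem mul_add_div_eq {r c n : Nat} (hn : 0 < n) (hc : c < n) : (r * n + c) / n = r := by
  rw [mul_comm, Nat.mul_add_div hn, Nat.div_eq_of_lt hc, Nat.add_zero]

theorem mul_add_mod_eq {r c n : Nat} (hc : c < n) : (r * n + c) % n = c := by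
  rw [mul_comm r n, Nat.mul_add_mod, Nat.mod_eq_of_lt hc]

theorem flat_len (grid : List (List Int)) (n : Nat)
    (hrect : ∀ row ∈ grid, row.length = n) : grid.flatten.length = grid.length * n := by
  induction grid with
  | nil => simp
  | cons row rest ih =>
    simp only [List.flatten_cons, List.length_append, List.length_cons]
    rw [hrect row (by simp), ih (fun r hr => hrect r (by simp [hr]))]
    ring

theorem flat_getD (grid : List (List Int)) (n : Nat) (hn : 0 < n)
    (hrect : ∀ row ∈ grid, row.length = n) (s : Nat) (hs : s < grid.length * n) :
    grid.flatten.getD s 0 = ((grid.getD (s / n) []).getD (s % n) 0) := by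
  induction grid generalizing s with
  | nil => simp at hs
  | cons row rest ih =>
    have hr : row.length = n := hrect row (by simp)
    by_cases h : s < n
    · rw [List.flatten_cons, List.getD_append _ _ _ s (by omega),
        Nat.div_eq_of_lt h, Nat.mod_eq_of_lt h]
      simp
    · rw [not_lt] at h
      rw [List.flatten_cons, List.getD_append_right _ _ _ s (by omega)]
      have e1 : s / n = (s - n) / n + 1 := by
        conv_lhs => rw [show s = (s - n) + n by omega]
        rw [Nat.add_div_right _ hn]
      have e2 : s % n = (s - n) % n := by
        conv_lhs => rw [show s = (s - n) + n by omega]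
        rw [Nat.add_mod_right]
      rw [hr, e1, e2]
      simp only [List.getD_cons_succ]
      exact ih (fun r hrr => hrect r (by simp [hrr])) (s - n)
        (by rw [List.length_cons, Nat.add_mul, Nat.one_mul] at hs; omega)

theorem rot_getD_gen (arr : List Int) (kN t : Nat) (hk : kN ≤ arr.length)
    (ht : t < arr.length) :
    (arr.drop (arr.length - kN) ++ arr.take (arr.length - kN)).getD t 0
      = arr.getD (if t < kN then arr.length - kN + t else t - kN) 0 := by
  have hdl : (arr.drop (arr.length - kN)).length = kN := by rw [List.length_drop]; omega
  by_cases h : t < kN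
  · rw [List.getD_append _ _ _ t (by rw [hdl]; omega), if_pos h,
      List.getD_eq_getElem _ _ (by rw [hdl]; omega), List.getD_eq_getElem _ _ (by omega)]
    simp only [List.getElem_drop]
  · rw [List.getD_append_right _ _ _ t (by rw [hdl]; omega), if_neg h, hdl,
      List.getD_eq_getElem _ _ (by rw [List.length_take]; omega),
      List.getD_eq_getElem _ _ (by omega)]
    simp only [List.getElem_take]

theorem rot_getD (grid : List (List Int)) (kN t : Nat) (hk : kN ≤ grid.flatten.length)
    (ht : t < grid.flatten.length) :
    (rotFlat grid kN).getD t 0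
      = grid.flatten.getD (if t < kN then grid.flatten.length - kN + t else t - kN) 0 :=
  rot_getD_gen grid.flatten kN t hk ht

theorem rot_zero (grid : List (List Int)) : rotFlat grid 0 = grid.flatten := by
  simp only [rotFlat, Nat.sub_zero, List.drop_length, List.take_length, List.nil_append]

theorem rot_len (grid : List (List Int)) (kN : Nat) (hk : kN ≤ grid.flatten.length) :
    (rotFlat grid kN).length = grid.flatten.length := by
  simp only [rotFlat, List.length_append, List.length_drop, List.length_take]; omega

theorem modsub (t kN tot : Nat) (hk : kN < tot) (ht : t < tot) :
    PySem.Int.mod ((t : Int) - (kN : Int)) (tot : Int)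
      = ((if t < kN then tot - kN + t else t - kN : Nat) : Int) := by
  rw [PySem.Int.mod_eq_emod_of_pos (by exact_mod_cast Nat.zero_lt_of_lt hk)]
  by_cases h : t < kN
  · rw [if_pos h]
    have : (t : Int) - kN = ((tot - kN + t : Nat) : Int) + (tot : Int) * (-1) := by
      push_cast; omega
    rw [this, Int.add_mul_emod_self_left, Int.emod_eq_of_lt (by positivity) (by push_cast; omega)]
  · rw [if_neg h]
    have : (t : Int) - kN = ((t - kN : Nat) : Int) := by push_cast; omega
    rw [this, Int.emod_eq_of_lt (by positivity) (by push_cast; omega)]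

theorem div_succ (n t : Nat) (hn : 0 < n) :
    (t + 1) / n = if t % n = n - 1 then t / n + 1 else t / n := by
  have hdm := Nat.div_add_mod t n
  have hm : t % n < n := Nat.mod_lt _ hn
  by_cases h : t % n = n - 1
  · rw [if_pos h, show t + 1 = n * (t / n + 1) by rw [Nat.mul_succ]; omega,
      Nat.mul_div_cancel_left _ hn]
  · rw [if_neg h, show t + 1 = n * (t / n) + (t % n + 1) by omega,
      Nat.mul_add_div hn, Nat.div_eq_of_lt (show t % n + 1 < n by omega), Nat.add_zero]

theorem gaux_zero (grid : List (List Int)) (n : Nat) (arr2 : List Int)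
    (hrect : ∀ row ∈ grid, row.length = n) : GAux grid n arr2 0 = grid := by
  apply List.ext_getElem (by simp [GAux])
  intro r h1 h2
  simp only [GAux, List.getElem_map, List.getElem_range]
  have hrow : grid[r].length = n := hrect _ (List.getElem_mem _)
  apply List.ext_getElem (by simpa using hrow.symm)
  intro c hc1 hc2
  simp only [List.getElem_map, List.getElem_range]
  have h2' : r < grid.length := by simpa using h2
  have hc : c < n := by simpa using hc1
  rw [if_neg (by omega), List.getD_eq_getElem _ _ h2', List.getD_eq_getElem _ _ (by omega)]

theorem gaux_flatten (grid : List (List Int)) (n : Nat) (hn : 0 < n)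
    (hrect : ∀ row ∈ grid, row.length = n) :
    GAux grid n grid.flatten (grid.length * n) = grid := by
  apply List.ext_getElem (by simp [GAux])
  intro r h1 h2
  simp only [GAux, List.getElem_map, List.getElem_range]
  have hrow : grid[r].length = n := hrect _ (List.getElem_mem _)
  apply List.ext_getElem (by simpa using hrow.symm)
  intro c hc1 hc2
  simp only [List.getElem_map, List.getElem_range]
  have h2' : r < grid.length := by simpa using h2
  have hc : c < n := by simpa using hc1
  rw [if_pos (idx_lt h2' hc),
    flat_getD grid n hn hrect _ (idx_lt h2' hc),
    mul_add_div_eq hn hc, mul_add_mod_eq hc,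
    List.getD_eq_getElem _ _ h2', List.getD_eq_getElem _ _ (by omega)]

theorem gaux_step (grid : List (List Int)) (n : Nat) (arr2 : List Int) (hn : 0 < n)
    (t : Nat) (ht : t < grid.length * n) :
    (GAux grid n arr2 t).set (t / n)
      (((GAux grid n arr2 t).getD (t / n) []).set (t % n) (arr2.getD t 0))
      = GAux grid n arr2 (t + 1) := by
  have hm0 : 0 < grid.length := by
    rcases Nat.eq_zero_or_pos grid.length with h | h
    · rw [h] at ht; omega
    · exact h
  have hdiv : t / n < grid.length := Nat.div_lt_of_lt_mul (by rwa [Nat.mul_comm] at ht)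
  have hmod : t % n < n := Nat.mod_lt _ hn
  have hdm : n * (t / n) + t % n = t := Nat.div_add_mod t n
  have hdm' : t / n * n + t % n = t := by rw [mul_comm] at hdm; exact hdm
  have hrowD : (GAux grid n arr2 t).getD (t / n) []
      = (List.range n).map (fun c =>
          if (t / n) * n + c < t then arr2.getD ((t / n) * n + c) 0
          else (grid.getD (t / n) []).getD c 0) := by
    rw [List.getD_eq_getElem _ _ (by simpa [GAux] using hdiv)]
    simp [GAux]
  apply List.ext_getElem (by simp [GAux])
  intro r h1 h2
  have hr : r < grid.length := by simpa [GAux] using h2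
  rw [List.getElem_set]
  by_cases hrq : t / n = r
  · rw [if_pos hrq, hrowD]
    apply List.ext_getElem (by simp [GAux])
    intro c hc1 hc2
    have hc : c < n := by simpa using hc1
    simp only [List.getElem_set, List.getElem_map, List.getElem_range, GAux]
    subst hrq
    by_cases hcq : t % n = c
    · rw [if_pos hcq, if_pos (by omega)]
      congr 1
      omega
    · rw [if_neg hcq]
      have hne : ¬ (t / n) * n + c = t := by
        intro he
        exact hcq (by rw [← he, mul_add_mod_eq hc])
      by_cases hlt : (t / n) * n + c < t
      · rw [if_pos hlt, if_pos (by omega)]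
      · rw [if_neg hlt, if_neg (by omega)]
  · rw [if_neg hrq]
    simp only [GAux, List.getElem_map, List.getElem_range]
    apply List.map_congr_left
    intro c hcm
    have hc : c < n := List.mem_range.mp hcm
    have hne : ¬ r * n + c = t := by
      intro he
      exact hrq (by rw [← he, mul_add_div_eq hn hc])
    by_cases hlt : r * n + c < t
    · rw [if_pos hlt, if_pos (by omega)]
    · rw [if_neg hlt, if_neg (by omega)]

theorem writeAll (new : List (List Int)) (L : Nat) (hL : new.length = L) :
    ∀ (fuel a : Nat) (g : List (List Int)), g.length = L → L - a ≤ fuel →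
    (PySem.List.pyRange (a : Nat) (L : Int) 1).foldl
      (fun g' r => PySem.List.pySetD g' r (PySem.List.pyGetD new r [])) g
      = g.take a ++ new.drop a := by
  intro fuel
  induction fuel with
  | zero =>
    intro a g hg hf
    rw [PySem.List.pyRange_one_eq_nil (by exact_mod_cast by omega : (L:Int) ≤ (a:Int))]
    rw [List.foldl_nil, List.take_of_length_le (by omega), List.drop_of_length_le (by omega),
      List.append_nil]
  | succ fuel ih =>
    intro a g hg hf
    by_cases ha : a < L
    · rw [PySem.List.pyRange_one_cons (by exact_mod_cast ha), List.foldl_cons,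
        PySem.List.pySetD_natCast, PySem.List.pyGetD_natCast,
        show ((a : Int) + 1) = ((a + 1 : Nat) : Int) by push_cast; ring]
      rw [ih (a + 1) (g.set a (new.getD a [])) (by simpa using hg) (by omega)]
      rw [List.drop_eq_getElem_cons (by omega : a < new.length)]
      rw [List.take_succ]
      have h1 : (g.set a (new.getD a [])).take a = g.take a := by
        apply List.ext_getElem (by simp)
        intro i hi1 hi2
        rw [List.getElem_take, List.getElem_take, List.getElem_set,
          if_neg (by simp at hi1; omega)]
      have h2 : (g.set a (new.getD a []))[a]?.toList = [new.getD a []] := by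
        rw [List.getElem?_set_self (by omega)]
        simp
      rw [h1, h2, List.getD_eq_getElem _ _ (by omega)]
      simp
    · rw [PySem.List.pyRange_one_eq_nil (by exact_mod_cast by omega : (L:Int) ≤ (a:Int))]
      rw [List.foldl_nil, List.take_of_length_le (by omega),
        List.drop_of_length_le (by omega), List.append_nil]

theorem reshape (grid : List (List Int)) (n : Nat) (arr2 : List Int) (hn : 0 < n)
    (t : Nat) (hrect : ∀ row ∈ grid, row.length = n) (ht : t ≤ grid.length * n) :
    (PySem.List.pyRange 0 (t : Int) 1).foldl
      (fun (st : List (List Int) × Int) i =>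
        (PySem.List.pySetD st.1 st.2
          (PySem.List.pySetD (PySem.List.pyGetD st.1 st.2 []) (PySem.Int.mod i (n : Int))
            (PySem.List.pyGetD arr2 i 0)),
         if PySem.Int.mod i (n : Int) = (n : Int) - 1 then st.2 + 1 else st.2))
      (grid, 0)
      = (GAux grid n arr2 t, ((t / n : Nat) : Int)) := by
  induction t with
  | zero =>
    rw [PySem.List.pyRange_one_eq_nil (by omega)]
    simp [gaux_zero grid n arr2 hrect]
  | succ t ih =>
    have ht' : t < grid.length * n := by omega
    rw [show ((t + 1 : Nat) : Int) = (t : Int) + 1 by push_cast; ring,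
      PySem.List.pyRange_one_succ_right (by positivity), List.foldl_append,
      ih (by omega), List.foldl_cons, List.foldl_nil]
    have hmodc : PySem.Int.mod (t : Int) (n : Int) = ((t % n : Nat) : Int) :=
      PySem.Int.mod_natCast t n
    have hmodlt : t % n < n := Nat.mod_lt _ hn
    apply Prod.ext
    · show PySem.List.pySetD (GAux grid n arr2 t) ((t / n : Nat) : Int)
        (PySem.List.pySetD (PySem.List.pyGetD (GAux grid n arr2 t) ((t / n : Nat) : Int) [])
          (PySem.Int.mod (t : Int) (n : Int)) (PySem.List.pyGetD arr2 (t : Int) 0))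
        = GAux grid n arr2 (t + 1)
      rw [hmodc, PySem.List.pyGetD_natCast, PySem.List.pyGetD_natCast,
        PySem.List.pySetD_natCast, PySem.List.pySetD_natCast]
      exact gaux_step grid n arr2 hn t ht'
    · show (if PySem.Int.mod (t : Int) (n : Int) = (n : Int) - 1
          then ((t / n : Nat) : Int) + 1 else ((t / n : Nat) : Int))
        = (((t + 1) / n : Nat) : Int)
      rw [hmodc, div_succ n t hn]
      by_cases h : t % n = n - 1
      · rw [if_pos (by rw [h]; push_cast; omega), if_pos h]
        push_cast; ring
      · rw [if_neg (fun hc => h (by omega)), if_neg h]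

theorem new_eq_gaux (grid : List (List Int)) (n : Nat) (hn : 0 < n)
    (hrect : ∀ row ∈ grid, row.length = n) (kI : Int) (h0 : 0 ≤ kI)
    (hlt : kI < ((grid.length * n : Nat) : Int)) :
    ((PySem.List.pyRange 0 ((grid.length : Nat) : Int) 1).map (fun i =>
      (PySem.List.pyRange 0 ((n : Nat) : Int) 1).map (fun j =>
        PySem.List.pyGetD
          (PySem.List.pyGetD grid
            (PySem.Int.floordiv
              (PySem.Int.mod (i * (n : Int) + j - kI) ((grid.length : Int) * (n : Int))) (n : Int)) [])
          (PySem.Int.mod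
            (PySem.Int.mod (i * (n : Int) + j - kI) ((grid.length : Int) * (n : Int))) (n : Int)) 0)))
      = GAux grid n (rotFlat grid kI.toNat) (grid.length * n) := by
  have hkN : kI = ((kI.toNat : Nat) : Int) := (Int.toNat_of_nonneg h0).symm
  set kN := kI.toNat with hkn_def
  have hkn : kN < grid.length * n := by
    rw [hkN] at hlt; exact_mod_cast hlt
  have hfl : grid.flatten.length = grid.length * n := flat_len grid n hrect
  rw [PySem.List.pyRange_zero_nat, PySem.List.pyRange_zero_nat, List.map_map, GAux]
  apply List.map_congr_left
  intro i him
  have hi : i < grid.length := List.mem_range.mp him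
  rw [Function.comp_apply, List.map_map]
  apply List.map_congr_left
  intro j hjm
  have hj : j < n := List.mem_range.mp hjm
  have hT : i * n + j < grid.length * n := idx_lt hi hj
  rw [Function.comp_apply, if_pos hT]
  have e1 : ((i : Nat) : Int) * (n : Int) + ((j : Nat) : Int) - kI
      = ((i * n + j : Nat) : Int) - ((kN : Nat) : Int) := by
    rw [hkN]; push_cast; ring
  have e2 : ((grid.length : Int) * (n : Int)) = ((grid.length * n : Nat) : Int) := by
    push_cast; ring
  rw [e1, e2, modsub _ _ _ hkn hT, PySem.Int.floordiv_natCast, PySem.Int.mod_natCast,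
    PySem.List.pyGetD_natCast, PySem.List.pyGetD_natCast]
  set S : Nat := (if i * n + j < kN then grid.length * n - kN + (i * n + j) else i * n + j - kN)
    with hS_def
  have hS : S < grid.length * n := by
    rw [hS_def]; split <;> omega
  rw [rot_getD grid kN (i * n + j) (by omega) (by omega), hfl, ← hS_def,
    flat_getD grid n hn hrect S hS]

theorem portA (grid : List (List Int)) (k : Int) (hne : grid ≠ [])
    (hn : (grid.headD []).length ≠ 0)
    (hrect : ∀ row ∈ grid, row.length = (grid.headD []).length) :
    shiftGrid grid k
      = GAux grid (grid.headD []).length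
          (rotFlat grid
            (PySem.Int.mod k ((grid.length : Int) * ((grid.headD []).length : Int))).toNat)
          (grid.length * (grid.headD []).length) := by
  have hm0 : 0 < grid.length := List.length_pos_iff.mpr hne
  simp only [shiftGrid]
  set n := (grid.headD []).length with hn_def
  have hnpos : 0 < n := Nat.pos_of_ne_zero hn
  have htotpos : (0 : Int) < (grid.length : Int) * (n : Int) := by
    exact_mod_cast Nat.mul_pos hm0 hnpos
  set k2 : Int := PySem.Int.mod k ((grid.length : Int) * (n : Int)) with hk2_def
  have h0 : 0 ≤ k2 := PySem.Int.mod_nonneg _ htotpos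
  have hk2 : k2 < (grid.length : Int) * (n : Int) := PySem.Int.mod_lt _ htotpos
  have hfl : grid.flatten.length = grid.length * n := flat_len grid n hrect
  have hkN : k2 = ((k2.toNat : Nat) : Int) := (Int.toNat_of_nonneg h0).symm
  have hkNlt : k2.toNat < grid.length * n := by
    have : k2 < ((grid.length * n : Nat) : Int) := by
      rw [show ((grid.length * n : Nat) : Int) = (grid.length : Int) * (n : Int) by push_cast; ring]
      exact hk2
    omega
  by_cases hz : k2 = 0
  · rw [if_pos hz, hz]
    rw [show (0 : Int).toNat = 0 from rfl, rot_zero]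
    exact (gaux_flatten grid n hnpos hrect).symm
  · rw [if_neg hz]
    have hkpos : 0 < k2.toNat := by omega
    simp only [PySem.List.foldl_append_singleton]
    rw [PySem.List.foldl_append_eq_flatMap (fun (r : List Int) => r) grid []]
    simp only [List.nil_append]
    have hfm : List.flatMap (fun (r : List Int) => r) grid = grid.flatten := by
      simp [List.flatMap_def]
    rw [hfm]
    rw [hkN]
    simp only [Int.toNat_natCast]
    rw [PySem.List.slice_from_neg_natCast _ _ hkpos,
      PySem.List.slice_to_neg_natCast _ _ hkpos]
    have hrw : grid.flatten.drop (grid.flatten.length - k2.toNat)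
        ++ grid.flatten.take (grid.flatten.length - k2.toNat) = rotFlat grid k2.toNat := rfl
    rw [hrw, rot_len grid k2.toNat (by omega), hfl]
    rw [reshape grid n (rotFlat grid k2.toNat) hnpos (grid.length * n) hrect (le_refl _)]

theorem portB (grid : List (List Int)) (k : Int) (hne : grid ≠ [])
    (hn : (grid.headD []).length ≠ 0)
    (hrect : ∀ row ∈ grid, row.length = (grid.headD []).length) :
    shiftGrid_alt grid k
      = GAux grid (grid.headD []).length
          (rotFlat grid
            (PySem.Int.mod k ((grid.length : Int) * ((grid.headD []).length : Int))).toNat)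
          (grid.length * (grid.headD []).length) := by
  have hm0 : 0 < grid.length := List.length_pos_iff.mpr hne
  set n := (grid.headD []).length with hn_def
  have htotpos : (0 : Int) < (grid.length : Int) * (n : Int) := by
    exact_mod_cast Nat.mul_pos hm0 (Nat.pos_of_ne_zero hn)
  have h0 : 0 ≤ PySem.Int.mod k ((grid.length : Int) * (n : Int)) :=
    PySem.Int.mod_nonneg _ htotpos
  have hk2 : PySem.Int.mod k ((grid.length : Int) * (n : Int)) < (grid.length : Int) * (n : Int) :=
    PySem.Int.mod_lt _ htotpos
  simp only [shiftGrid_alt]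
  have hlen : ((PySem.List.pyRange 0 ((grid.length : Nat) : Int) 1).map (fun i =>
      (PySem.List.pyRange 0 ((n : Nat) : Int) 1).map (fun j =>
        PySem.List.pyGetD
          (PySem.List.pyGetD grid
            (PySem.Int.floordiv
              (PySem.Int.mod (i * (n : Int) + j - PySem.Int.mod k ((grid.length : Int) * (n : Int)))
                ((grid.length : Int) * (n : Int))) (n : Int)) [])
          (PySem.Int.mod
            (PySem.Int.mod (i * (n : Int) + j - PySem.Int.mod k ((grid.length : Int) * (n : Int)))
              ((grid.length : Int) * (n : Int))) (n : Int)) 0))).length = grid.length := by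
    rw [List.length_map, PySem.List.pyRange_zero_nat, List.length_map, List.length_range]
  have hw := writeAll _ grid.length hlen grid.length 0 grid rfl (by omega)
  rw [Nat.cast_zero] at hw
  rw [hw, List.take_zero, List.drop_zero, List.nil_append]
  exact new_eq_gaux grid n (Nat.pos_of_ne_zero hn) hrect _ h0
    (by rw [show ((grid.length * n : Nat) : Int) = (grid.length : Int) * (n : Int) by push_cast; ring]; exact hk2)

-- ===== VERDICT (by name: the statement is the Claim_ definition above) =====
theorem shiftGrid_spec : Claim_equal_shiftGrid := by
  intro grid k _hDom hPre
  obtain ⟨hne, hn, hrect⟩ := hPre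
  unfold Spec_shiftGrid
  rw [portA grid k hne hn hrect, portB grid k hne hn hrect]
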